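-- pv_equiv track=rewrite | github.com/Finder12345/excel_parser | excel_parse_413/excel_parse/excel_utils/parse_signal.py | get_excel_column_mapping
-- ===== SOURCE A (Python) =====
-- def get_excel_column_mapping(headers):
--     """根据表头列数生成"表头文本 → Excel 列字母(A/B/AA...)"映射。
--
--     功能逻辑：
--     - 按 headers 的顺序生成对应 Excel 列字母。
--     - 过滤掉空白表头。
--
--     返回:
--     - mapping: {"Signal Name": "A", "Msg ID": "D", ...}
--     """
--     """
--     根据传入的表头列表动态生成Excel列名映射关系。
--
--     :param headers: List[str] 表头列表
--     :return: dict 表头与Excel列名的映射关系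
--     """
--     # 获取Excel列名（A, B, C, ..., Z, AA, AB, ...）
--     excel_columns = []
--     for i in range(1, len(headers) + 1):
--         column_name = ""
--         while i > 0:
--             i -= 1
--             column_name = chr(i % 26 + 65) + column_name
--             i //= 26
--         excel_columns.append(column_name)
--
--     # 创建映射关系
--     mapping = {header: excel_columns[idx] for idx, header in enumerate(headers) if header.strip()}
--     return mapping
-- ===== SOURCE B (Python) =====
-- def get_excel_column_mapping(headers):
--     """Same mapping, but via an odometer: keep the current column label as a
--     list of letter digits and increment it with carry for each header, instead
--     of converting each index by repeated divmod."""
--     mapping = {}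
--     digits = []  # bijective base-26 digits, 0 == 'A', most significant first
--     for h in headers:
--         i = len(digits) - 1
--         while i >= 0:
--             if digits[i] < 25:
--                 digits[i] += 1
--                 break
--             digits[i] = 0
--             i -= 1
--         else:
--             digits.insert(0, 0)
--         if h.strip():
--             mapping[h] = "".join(chr(65 + d) for d in digits)
--     return mapping
-- ===== Notes on version B (the rewrite author's own statement) =====
-- stated objective: alternative
-- what changed: Replaces A's precomputed per-index divmod base-26 table plus filtered second pass with a single pass keeping the current column label as an odometer digit list incremented with carry per header.
import Mathlib
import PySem

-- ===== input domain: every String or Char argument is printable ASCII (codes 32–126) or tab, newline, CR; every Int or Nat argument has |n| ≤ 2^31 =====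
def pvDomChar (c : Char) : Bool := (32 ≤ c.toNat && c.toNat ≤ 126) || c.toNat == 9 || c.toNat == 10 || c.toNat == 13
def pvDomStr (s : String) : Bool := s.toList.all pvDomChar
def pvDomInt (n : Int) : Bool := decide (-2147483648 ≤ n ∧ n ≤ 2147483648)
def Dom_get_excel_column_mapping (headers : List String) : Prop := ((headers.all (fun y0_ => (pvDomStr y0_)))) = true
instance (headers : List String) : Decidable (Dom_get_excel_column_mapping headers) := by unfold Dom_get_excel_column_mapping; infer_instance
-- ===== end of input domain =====

-- B replaces A's precomputed per-index divmod base-26 table plus filtered second pass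
-- with a single pass that keeps the current column label as an odometer digit list
-- incremented with carry for each header (objective: alternative).

-- ===== PORT A =====
-- inner while loop of A: while i > 0: i -= 1; column_name = chr(i % 26 + 65) + column_name; i //= 26
def colNameLoopA (i : Int) (column_name : String) : String :=
  if i > 0 then
    colNameLoopA (PySem.Int.floordiv (i - 1) 26)
      (String.mk [Char.ofNat ((PySem.Int.mod (i - 1) 26).toNat + 65)] ++ column_name)
  else column_name
termination_by i.toNat
decreasing_by
  have h1 : PySem.Int.floordiv (i - 1) 26 = (i - 1) / 26 :=
    PySem.Int.floordiv_eq_ediv_of_pos (by norm_num)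
  have h2 : (i - 1) / 26 ≤ i - 1 := Int.ediv_le_self _ (by omega)
  rw [h1]; omega

def get_excel_column_mapping (headers : List String) : List (String × String) :=
  -- excel_columns table, built by the range(1, len(headers)+1) loop
  let excel_columns : List String :=
    (PySem.List.pyRange 1 ((headers.length : Int) + 1) 1).foldl
      (fun acc i => acc ++ [colNameLoopA i ""]) []
  -- dict comprehension over enumerate(headers); excel_columns[idx] is always in range here
  let mapping :=
    (PySem.List.enumerate headers 0).foldl
      (fun d p => if PySem.Str.strip p.2 ≠ "" then d.insert p.2 (PySem.List.pyGetD excel_columns p.1 "") else d)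
      (PySem.Dict.empty : PySem.Dict String String)
  mapping.items

-- ===== PORT B =====
-- B's in-place carry loop scans digits from the right; transcribed here on the
-- reversed (least-significant-first) digit list: increment the low digit, on
-- overflow zero it and recurse into the higher digits, appending a new 'A'
-- digit when the carry runs past the front (the while's else branch).
def incRev (ds : List Nat) : List Nat :=
  match ds with
  | [] => [0]
  | d :: rest => if d < 25 then (d + 1) :: rest else 0 :: incRev rest

def get_excel_column_mapping_alt (headers : List String) : List (String × String) :=
  ((headers.foldl
      (fun (st : PySem.Dict String String × List Nat) h =>
        let ds := incRev st.2
        (if PySem.Str.strip h ≠ "" then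
           st.1.insert h (String.mk (ds.reverse.map (fun d => Char.ofNat (65 + d))))
         else st.1, ds))
      ((PySem.Dict.empty : PySem.Dict String String), [])).1).items

-- ===== PRECONDITION & SPEC =====
def Spec_get_excel_column_mapping (headers : List String) (out : List (String × String)) : Prop := out = get_excel_column_mapping_alt headers
instance (headers : List String) (out : List (String × String)) : Decidable (Spec_get_excel_column_mapping headers out) := by unfold Spec_get_excel_column_mapping; infer_instance

-- ===== CLAIM (what is proved, stated in full; the proofs are below) =====
def Claim_equal_get_excel_column_mapping : Prop := ∀ (headers : List String), Dom_get_excel_column_mapping headers → Spec_get_excel_column_mapping headers (get_excel_column_mapping headers)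

-- ===== LEMMAS AND PROOFS =====

-- bijective base-26 digits of n, least significant first
def digitsOf : Nat → List Nat
  | 0 => []
  | n + 1 => (n % 26) :: digitsOf (n / 26)
decreasing_by exact Nat.lt_succ_of_le (Nat.div_le_self _ _)

theorem incRev_digitsOf (n : Nat) : incRev (digitsOf n) = digitsOf (n + 1) := by
  induction n using Nat.strong_induction_on with
  | _ n ih =>
    match n with
    | 0 => simp [digitsOf, incRev]
    | Nat.succ m =>
      rw [digitsOf, incRev]
      by_cases h : m % 26 < 25
      · simp only [h, if_pos]
        rw [show m + 1 + 1 = (m + 1) + 1 from rfl, digitsOf]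
        have : (m + 1) % 26 = m % 26 + 1 := by omega
        have : (m + 1) / 26 = m / 26 := by omega
        simp_all
      · simp only [h, if_neg]
        rw [ih (m / 26) (by omega)]
        conv_rhs => rw [show m + 1 + 1 = (m + 1) + 1 from rfl, digitsOf]
        have e1 : (m + 1) % 26 = 0 := by omega
        have e2 : (m + 1) / 26 = m / 26 + 1 := by omega
        rw [e1, e2]
        simp

theorem colNameLoopA_digits (n : Nat) (c : String) :
    colNameLoopA (n : Int) c
      = String.mk ((digitsOf n).reverse.map (fun d => Char.ofNat (65 + d))) ++ c := by
  induction n using Nat.strong_induction_on generalizing c with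
  | _ n ih =>
    match n with
    | 0 => rw [colNameLoopA]; simp [digitsOf]; rfl
    | Nat.succ m =>
      rw [colNameLoopA]
      have hpos : ((m + 1 : Nat) : Int) > 0 := by positivity
      simp only [hpos, if_pos]
      have hsub : ((m + 1 : Nat) : Int) - 1 = (m : Int) := by push_cast; ring
      have hfd : PySem.Int.floordiv (m : Int) 26 = ((m / 26 : Nat) : Int) := by
        rw [PySem.Int.floordiv_eq_ediv_of_pos (by norm_num)]
        omega
      have hmd : PySem.Int.mod (m : Int) 26 = ((m % 26 : Nat) : Int) := by
        rw [PySem.Int.mod_eq_emod_of_pos (by norm_num)]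
        omega
      rw [hsub, hfd, hmd, ih (m / 26) (by omega)]
      rw [digitsOf]
      simp [Nat.add_comm, String.mk, ← String.append_assoc]
      rfl

-- A's table lookup at index k is colNameLoopA (k+1) ""
theorem main_fold (hs : List String) (k : Nat) (d : PySem.Dict String String) :
    (hs.foldl
      (fun (st : PySem.Dict String String × List Nat) h =>
        let ds := incRev st.2
        (if PySem.Str.strip h ≠ "" then
           st.1.insert h (String.mk (ds.reverse.map (fun dg => Char.ofNat (65 + dg))))
         else st.1, ds))
      (d, digitsOf k)).1
    = (PySem.List.enumerate hs (k : Int)).foldl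
        (fun d p => if PySem.Str.strip p.2 ≠ "" then d.insert p.2 (colNameLoopA (p.1 + 1) "") else d) d := by
  induction hs generalizing k d with
  | nil => simp [PySem.List.enumerate_nil]
  | cons h t ih =>
    rw [PySem.List.enumerate_cons]
    simp only [List.foldl_cons, incRev_digitsOf]
    have hc : colNameLoopA ((k : Int) + 1) ""
        = String.mk ((digitsOf (k + 1)).reverse.map (fun dg => Char.ofNat (65 + dg))) := by
      have := colNameLoopA_digits (k + 1) ""
      simpa using this
    have := ih (k + 1) (if PySem.Str.strip h ≠ "" then
        d.insert h (String.mk ((digitsOf (k + 1)).reverse.map (fun dg => Char.ofNat (65 + dg))))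
      else d)
    rw [hc]
    push_cast at this ⊢
    exact this

-- ===== VERDICT (by name: the statement is the Claim_ definition above) =====
theorem get_excel_column_mapping_spec : Claim_equal_get_excel_column_mapping := by
  intro headers _
  unfold Spec_get_excel_column_mapping get_excel_column_mapping get_excel_column_mapping_alt
  rw [PySem.List.foldl_append_eq_flatMap]
  simp only [List.nil_append, ← List.map_eq_flatMap]
  congr 1
  have hA : (PySem.List.enumerate headers 0).foldl
      (fun d p => if PySem.Str.strip p.2 ≠ "" then
          d.insert p.2 (PySem.List.pyGetD ((PySem.List.pyRange 1 ((headers.length : Int) + 1) 1).map (fun i => colNameLoopA i "")) p.1 "")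
        else d)
      (PySem.Dict.empty : PySem.Dict String String)
    = (PySem.List.enumerate headers (0 : Int)).foldl
        (fun d p => if PySem.Str.strip p.2 ≠ "" then d.insert p.2 (colNameLoopA (p.1 + 1) "") else d)
        (PySem.Dict.empty : PySem.Dict String String) := by
    apply PySem.List.foldl_congr_mem
    intro d p hp
    rcases (PySem.List.mem_enumerate_iff _ _ _).1 hp with ⟨k, hk, rfl⟩
    simp only [zero_add]
    rw [PySem.List.pyGetD_map_pyRange_one _ _ _ k _ (by omega)]
    norm_num [add_comm]
  rw [hA]
  have := main_fold headers 0 (PySem.Dict.empty : PySem.Dict String String)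
  simpa [digitsOf] using this.symm
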